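-- pv_equiv track=rewrite | github.com/traviswye/SVREDO2 | Scripts/dfs/normhit.py | compute_team_totals
-- ===== SOURCE A (Python) =====
-- def compute_team_totals(hitters):
--     """
--     Aggregate team totals from the list of hitter records.
--     Returns a dictionary with totals for AB, H, doubles, triples, HR, BB.
--     """
--     totals = {
--         'ab': 0,
--         'h': 0,
--         'doubles': 0,
--         'triples': 0,
--         'hr': 0,
--         'bb': 0
--     }
--     for hit in hitters:
--         totals['ab'] += int(hit.get("ab", 0))
--         totals['h']  += int(hit.get("h", 0))
--         # Use the key "doubles" if available; otherwise try "2B"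
--         totals['doubles'] += int(hit.get("doubles", hit.get("2B", 0)))
--         totals['triples'] += int(hit.get("triples", 0))
--         totals['hr'] += int(hit.get("hr", 0))
--         totals['bb'] += int(hit.get("bb", 0))
--     return totals
-- ===== SOURCE B (Python) =====
-- def compute_team_totals(hitters):
--     """
--     Aggregate team totals from the list of hitter records.
--     Returns a dictionary with totals for AB, H, doubles, triples, HR, BB.
--     """
--     return {
--         'ab': sum(int(h.get('ab', 0)) for h in hitters),
--         'h': sum(int(h.get('h', 0)) for h in hitters),
--         'doubles': sum(int(h.get('doubles', h.get('2B', 0))) for h in hitters),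
--         'triples': sum(int(h.get('triples', 0)) for h in hitters),
--         'hr': sum(int(h.get('hr', 0)) for h in hitters),
--         'bb': sum(int(h.get('bb', 0)) for h in hitters),
--     }
-- ===== Notes on version B (the rewrite author's own statement) =====
-- stated objective: idiomatic
-- what changed: Replaces the single loop mutating six accumulators in a pre-built dict with a dict literal whose six values are independent sum() generator expressions, one pass per field.
import Mathlib
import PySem

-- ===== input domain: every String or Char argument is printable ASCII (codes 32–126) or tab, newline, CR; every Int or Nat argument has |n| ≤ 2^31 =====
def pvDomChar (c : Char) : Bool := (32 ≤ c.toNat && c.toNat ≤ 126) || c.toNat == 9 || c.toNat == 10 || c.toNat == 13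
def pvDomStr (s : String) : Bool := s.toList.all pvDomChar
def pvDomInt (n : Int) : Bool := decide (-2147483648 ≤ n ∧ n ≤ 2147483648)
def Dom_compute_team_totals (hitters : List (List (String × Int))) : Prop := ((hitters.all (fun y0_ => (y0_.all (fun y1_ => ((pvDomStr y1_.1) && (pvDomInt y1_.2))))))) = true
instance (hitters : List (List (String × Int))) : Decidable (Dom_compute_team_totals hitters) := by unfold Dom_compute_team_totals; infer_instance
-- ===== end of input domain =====

-- B builds the totals dict as a literal of six independent per-field sums instead of one loop mutating six accumulators (idiomatic decomposition; same O(n) cost).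


-- ===== PORT A =====
-- hit.get(k, dflt) on an association list: first match (Python dicts have unique keys)
def pvGetD (h : List (String × Int)) (k : String) (dflt : Int) : Int :=
  match h.find? (fun p => p.1 == k) with
  | some p => p.2
  | none => dflt

def compute_team_totals (hitters : List (List (String × Int))) : List (String × Int) :=
  let totals : PySem.Dict String Int :=
    PySem.Dict.ofList [("ab", 0), ("h", 0), ("doubles", 0), ("triples", 0), ("hr", 0), ("bb", 0)]
  let totals := hitters.foldl (fun t hit =>
    let t := t.modify "ab" 0 (· + pvGetD hit "ab" 0)
    let t := t.modify "h" 0 (· + pvGetD hit "h" 0)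
    let t := t.modify "doubles" 0 (· + pvGetD hit "doubles" (pvGetD hit "2B" 0))
    let t := t.modify "triples" 0 (· + pvGetD hit "triples" 0)
    let t := t.modify "hr" 0 (· + pvGetD hit "hr" 0)
    t.modify "bb" 0 (· + pvGetD hit "bb" 0)) totals
  totals.items

-- ===== PORT B =====
def compute_team_totals_alt (hitters : List (List (String × Int))) : List (String × Int) :=
  [("ab",      (hitters.map (fun h => pvGetD h "ab" 0)).sum),
   ("h",       (hitters.map (fun h => pvGetD h "h" 0)).sum),
   ("doubles", (hitters.map (fun h => pvGetD h "doubles" (pvGetD h "2B" 0))).sum),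
   ("triples", (hitters.map (fun h => pvGetD h "triples" 0)).sum),
   ("hr",      (hitters.map (fun h => pvGetD h "hr" 0)).sum),
   ("bb",      (hitters.map (fun h => pvGetD h "bb" 0)).sum)]

-- ===== PRECONDITION & SPEC =====
def Spec_compute_team_totals (hitters : List (List (String × Int))) (out : List (String × Int)) : Prop := out = compute_team_totals_alt hitters
instance (hitters : List (List (String × Int))) (out : List (String × Int)) : Decidable (Spec_compute_team_totals hitters out) := by unfold Spec_compute_team_totals; infer_instance

-- ===== CLAIM (what is proved, stated in full; the proofs are below) =====
def Claim_equal_compute_team_totals : Prop := ∀ (hitters : List (List (String × Int))), Dom_compute_team_totals hitters → Spec_compute_team_totals hitters (compute_team_totals hitters)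

-- ===== LEMMAS AND PROOFS =====
def pvStep (t : PySem.Dict String Int) (hit : List (String × Int)) : PySem.Dict String Int :=
  let t := t.modify "ab" 0 (· + pvGetD hit "ab" 0)
  let t := t.modify "h" 0 (· + pvGetD hit "h" 0)
  let t := t.modify "doubles" 0 (· + pvGetD hit "doubles" (pvGetD hit "2B" 0))
  let t := t.modify "triples" 0 (· + pvGetD hit "triples" 0)
  let t := t.modify "hr" 0 (· + pvGetD hit "hr" 0)
  t.modify "bb" 0 (· + pvGetD hit "bb" 0)

lemma pvStep_lit (a b c d e f : Int) (hit : List (String × Int)) :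
    pvStep (PySem.Dict.mk [("ab", a), ("h", b), ("doubles", c), ("triples", d), ("hr", e), ("bb", f)]) hit
    = PySem.Dict.mk [("ab", a + pvGetD hit "ab" 0), ("h", b + pvGetD hit "h" 0),
        ("doubles", c + pvGetD hit "doubles" (pvGetD hit "2B" 0)),
        ("triples", d + pvGetD hit "triples" 0), ("hr", e + pvGetD hit "hr" 0),
        ("bb", f + pvGetD hit "bb" 0)] := by
  rfl

lemma pvFold_lit (hitters : List (List (String × Int))) :
    ∀ (a b c d e f : Int),
    hitters.foldl pvStep (PySem.Dict.mk [("ab", a), ("h", b), ("doubles", c), ("triples", d), ("hr", e), ("bb", f)])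
    = PySem.Dict.mk [("ab", a + (hitters.map (fun h => pvGetD h "ab" 0)).sum),
        ("h", b + (hitters.map (fun h => pvGetD h "h" 0)).sum),
        ("doubles", c + (hitters.map (fun h => pvGetD h "doubles" (pvGetD h "2B" 0))).sum),
        ("triples", d + (hitters.map (fun h => pvGetD h "triples" 0)).sum),
        ("hr", e + (hitters.map (fun h => pvGetD h "hr" 0)).sum),
        ("bb", f + (hitters.map (fun h => pvGetD h "bb" 0)).sum)] := by
  induction hitters with
  | nil => simp
  | cons hit rest ih =>
    intro a b c d e f
    simp only [List.foldl_cons, pvStep_lit, ih, List.map_cons, List.sum_cons]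
    simp [add_assoc]

-- ===== VERDICT (by name: the statement is the Claim_ definition above) =====
theorem compute_team_totals_spec : Claim_equal_compute_team_totals := by
  intro hitters _
  show compute_team_totals hitters = compute_team_totals_alt hitters
  unfold compute_team_totals compute_team_totals_alt
  have : PySem.Dict.ofList [("ab", (0:Int)), ("h", 0), ("doubles", 0), ("triples", 0), ("hr", 0), ("bb", 0)]
      = PySem.Dict.mk [("ab", 0), ("h", 0), ("doubles", 0), ("triples", 0), ("hr", 0), ("bb", 0)] := by rfl
  simp only [this]
  have hfold : hitters.foldl (fun t hit =>
      let t := t.modify "ab" 0 (· + pvGetD hit "ab" 0)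
      let t := t.modify "h" 0 (· + pvGetD hit "h" 0)
      let t := t.modify "doubles" 0 (· + pvGetD hit "doubles" (pvGetD hit "2B" 0))
      let t := t.modify "triples" 0 (· + pvGetD hit "triples" 0)
      let t := t.modify "hr" 0 (· + pvGetD hit "hr" 0)
      t.modify "bb" 0 (· + pvGetD hit "bb" 0))
      (PySem.Dict.mk [("ab", 0), ("h", 0), ("doubles", 0), ("triples", 0), ("hr", 0), ("bb", 0)])
    = hitters.foldl pvStep (PySem.Dict.mk [("ab", 0), ("h", 0), ("doubles", 0), ("triples", 0), ("hr", 0), ("bb", 0)]) := rfl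
  rw [hfold, pvFold_lit]
  simp
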